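-- pv_equiv track=rewrite | github.com/Rommmmaha/.dotfiles | .config/hypr/custom/toggle-outputs.py | check_if_linked
-- ===== SOURCE A (Python) =====
-- def check_if_linked(source_port, sink_port, linked_ports_output):
--     current_source = ""
--     for line in linked_ports_output:
--         if not line.startswith((' ', '\t')):
--             current_source = line.strip()
--         elif current_source == source_port and sink_port in line:
--             return True
--     return False
-- ===== SOURCE B (Python) =====
-- def check_if_linked(source_port, sink_port, linked_ports_output):
--     groups = {}
--     current_source = ""
--     for line in linked_ports_output:
--         if not line.startswith((' ', '\t')):
--             current_source = line.strip()
--         else: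
--             groups.setdefault(current_source, []).append(line)
--     return any(sink_port in line for line in groups.get(source_port, []))
-- ===== Notes on version B (the rewrite author's own statement) =====
-- stated objective: alternative
-- what changed: Replaces the fused scan-with-early-return by a two-phase index-then-lookup: first pass groups every indented line under its current header in a dict, then the answer is a membership scan over the one group for source_port.
import Mathlib
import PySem

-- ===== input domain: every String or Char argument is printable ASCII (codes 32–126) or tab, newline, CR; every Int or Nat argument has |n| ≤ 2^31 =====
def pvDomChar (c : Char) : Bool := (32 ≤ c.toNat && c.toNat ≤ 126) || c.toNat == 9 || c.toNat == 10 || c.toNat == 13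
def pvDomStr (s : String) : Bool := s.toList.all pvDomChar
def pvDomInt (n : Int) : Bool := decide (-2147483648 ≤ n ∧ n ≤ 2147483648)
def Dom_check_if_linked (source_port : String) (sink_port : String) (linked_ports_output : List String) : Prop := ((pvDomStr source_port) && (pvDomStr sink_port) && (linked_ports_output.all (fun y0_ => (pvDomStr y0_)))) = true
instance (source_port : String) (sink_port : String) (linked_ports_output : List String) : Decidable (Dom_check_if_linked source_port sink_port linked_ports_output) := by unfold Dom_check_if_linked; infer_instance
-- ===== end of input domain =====

-- B replaces A's fused scan-with-early-return by a two-phase index (group indented lines by header) then a lookup+membership scan; alternative decomposition, same cost.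

-- ===== PORT A =====
def checkALoop (source_port : String) (sink_port : String) (lines : List String) (current_source : String) : Bool :=
  match lines with
  | [] => false
  | line :: rest =>
    if !(PySem.Str.startswith line " " || PySem.Str.startswith line "\t") then
      checkALoop source_port sink_port rest (PySem.Str.strip line)
    else if current_source == source_port && PySem.Str.isIn sink_port line then
      true
    else
      checkALoop source_port sink_port rest current_source

def check_if_linked (source_port : String) (sink_port : String) (linked_ports_output : List String) : Bool :=
  checkALoop source_port sink_port linked_ports_output ""

-- ===== PORT B =====
-- first pass: groups.setdefault(current_source, []).append(line)  ==  groups.modify cur [] (· ++ [line])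
def buildGroups (lines : List String) (current_source : String)
    (groups : PySem.Dict String (List String)) : PySem.Dict String (List String) :=
  match lines with
  | [] => groups
  | line :: rest =>
    if !(PySem.Str.startswith line " " || PySem.Str.startswith line "\t") then
      buildGroups rest (PySem.Str.strip line) groups
    else
      buildGroups rest current_source (groups.modify current_source [] (· ++ [line]))

def check_if_linked_alt (source_port : String) (sink_port : String) (linked_ports_output : List String) : Bool :=
  ((buildGroups linked_ports_output "" PySem.Dict.empty).getD source_port []).any
    (fun line => PySem.Str.isIn sink_port line)

-- ===== PRECONDITION & SPEC =====
def Spec_check_if_linked (source_port : String) (sink_port : String) (linked_ports_output : List String) (out : Bool) : Prop := out = check_if_linked_alt source_port sink_port linked_ports_output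
instance (source_port : String) (sink_port : String) (linked_ports_output : List String) (out : Bool) : Decidable (Spec_check_if_linked source_port sink_port linked_ports_output out) := by unfold Spec_check_if_linked; infer_instance

-- ===== CLAIM (what is proved, stated in full; the proofs are below) =====
def Claim_equal_check_if_linked : Prop := ∀ (source_port : String) (sink_port : String) (linked_ports_output : List String), Dom_check_if_linked source_port sink_port linked_ports_output → Spec_check_if_linked source_port sink_port linked_ports_output (check_if_linked source_port sink_port linked_ports_output)

-- ===== LEMMAS AND PROOFS =====
-- Invariant relating B's grouping fold to A's fused scan: the sink-membership test over the
-- group for source_port equals any prior hits in the accumulated dict OR-ed with A's loop.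
theorem buildGroups_invariant (source_port sink_port : String) :
    ∀ (lines : List String) (cur : String) (d : PySem.Dict String (List String)),
      ((buildGroups lines cur d).getD source_port []).any (fun l => PySem.Str.isIn sink_port l)
        = (((d.getD source_port []).any (fun l => PySem.Str.isIn sink_port l))
            || checkALoop source_port sink_port lines cur)
  | [], cur, d => by simp [buildGroups, checkALoop]
  | line :: rest, cur, d => by
    by_cases h : (PySem.Str.startswith line " " || PySem.Str.startswith line "\t") = true
    · rw [buildGroups, checkALoop]
      simp only [h, Bool.not_true, Bool.false_eq_true, if_false]
      rw [buildGroups_invariant source_port sink_port rest cur]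
      rw [PySem.Dict.getD_modify]
      by_cases hc : source_port = cur
      · subst hc
        simp [Bool.or_assoc]
      · have hne : (cur == source_port) = false := by
          simp [beq_eq_false_iff_ne]; exact fun e => hc e.symm
        simp [if_neg hc, hne]
    · rw [buildGroups, checkALoop]
      have h' : (PySem.Str.startswith line " " || PySem.Str.startswith line "\t") = false := by
        simpa using h
      simp only [h', Bool.not_false, if_true]
      exact buildGroups_invariant source_port sink_port rest (PySem.Str.strip line) d

-- ===== VERDICT (by name: the statement is the Claim_ definition above) =====
theorem check_if_linked_spec : Claim_equal_check_if_linked := by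
  intro sp sk lines _
  unfold Spec_check_if_linked check_if_linked check_if_linked_alt
  rw [buildGroups_invariant]
  simp [PySem.Dict.getD_empty]
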